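-- pv_equiv track=rewrite | github.com/Cshoroni12-dotcom/password_strengthtester.py | password_strength.py | feedback
-- ===== SOURCE A (Python) =====
-- def feedback(password):
--     tips = []
--
--     if len(password) < 12:
--         tips.append("Make it longer")
--
--     if not any(c.isupper() for c in password):
--         tips.append("Add uppercase letters")
--
--     if not any(c.isdigit() for c in password):
--         tips.append("Add numbers")
--
--     if not any(not c.isalnum() for c in password):
--         tips.append("Add symbols (!@#)")
--
--     return tips
-- ===== SOURCE B (Python) =====
-- def feedback(password):
--     has_upper = has_digit = has_symbol = False
--     for c in password:
--         has_upper = has_upper or c.isupper()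
--         has_digit = has_digit or c.isdigit()
--         has_symbol = has_symbol or not c.isalnum()
--     tips = []
--     if len(password) < 12:
--         tips.append("Make it longer")
--     if not has_upper:
--         tips.append("Add uppercase letters")
--     if not has_digit:
--         tips.append("Add numbers")
--     if not has_symbol:
--         tips.append("Add symbols (!@#)")
--     return tips
-- ===== Notes on version B (the rewrite author's own statement) =====
-- stated objective: faster
-- what changed: Replaced the three separate any()-generator scans over the password with one loop that maintains three boolean flags, then emits the tips from the flags.
import Mathlib
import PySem

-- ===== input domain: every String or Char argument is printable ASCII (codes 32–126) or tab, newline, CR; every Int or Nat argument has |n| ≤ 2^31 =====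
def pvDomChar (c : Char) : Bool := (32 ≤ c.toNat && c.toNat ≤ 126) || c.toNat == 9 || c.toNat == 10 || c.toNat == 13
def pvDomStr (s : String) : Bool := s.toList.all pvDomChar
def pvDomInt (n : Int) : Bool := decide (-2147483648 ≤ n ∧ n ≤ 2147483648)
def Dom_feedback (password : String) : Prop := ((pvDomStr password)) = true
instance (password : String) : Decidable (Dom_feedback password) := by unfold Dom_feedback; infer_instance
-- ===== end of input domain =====

-- ===== PORT A =====
-- B replaces the three separate any() scans with one flag-maintaining pass; objective: alternative decomposition.
def feedback (password : String) : List String :=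
  let tips : List String := []
  let tips := if PySem.Str.len password < 12 then tips ++ ["Make it longer"] else tips
  let tips := if !(password.toList.any (fun c => PySem.Chars.isupper c)) then tips ++ ["Add uppercase letters"] else tips
  let tips := if !(password.toList.any (fun c => PySem.Chars.isdigit c)) then tips ++ ["Add numbers"] else tips
  let tips := if !(password.toList.any (fun c => !PySem.Chars.isalnum c)) then tips ++ ["Add symbols (!@#)"] else tips
  tips

-- ===== PORT B =====
def feedback_alt (password : String) : List String :=
  let flags := password.toList.foldl
    (fun (f : Bool × Bool × Bool) c =>
      (f.1 || PySem.Chars.isupper c, f.2.1 || PySem.Chars.isdigit c, f.2.2 || !PySem.Chars.isalnum c))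
    (false, false, false)
  let tips : List String := []
  let tips := if PySem.Str.len password < 12 then tips ++ ["Make it longer"] else tips
  let tips := if !flags.1 then tips ++ ["Add uppercase letters"] else tips
  let tips := if !flags.2.1 then tips ++ ["Add numbers"] else tips
  let tips := if !flags.2.2 then tips ++ ["Add symbols (!@#)"] else tips
  tips

-- ===== PRECONDITION & SPEC =====
def Spec_feedback (password : String) (out : List String) : Prop := out = feedback_alt password
instance (password : String) (out : List String) : Decidable (Spec_feedback password out) := by unfold Spec_feedback; infer_instance

-- ===== CLAIM (what is proved, stated in full; the proofs are below) =====
def Claim_equal_feedback : Prop := ∀ (password : String), Dom_feedback password → Spec_feedback password (feedback password)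

-- ===== LEMMAS AND PROOFS =====
theorem flags_foldl (l : List Char) (b1 b2 b3 : Bool) :
    l.foldl (fun (f : Bool × Bool × Bool) c =>
      (f.1 || PySem.Chars.isupper c, f.2.1 || PySem.Chars.isdigit c, f.2.2 || !PySem.Chars.isalnum c))
      (b1, b2, b3)
    = (b1 || l.any (fun c => PySem.Chars.isupper c),
       b2 || l.any (fun c => PySem.Chars.isdigit c),
       b3 || l.any (fun c => !PySem.Chars.isalnum c)) := by
  induction l generalizing b1 b2 b3 with
  | nil => simp
  | cons c t ih => simp [List.foldl_cons, ih, Bool.or_assoc]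

-- ===== VERDICT (by name: the statement is the Claim_ definition above) =====
theorem feedback_spec : Claim_equal_feedback := by
  intro password _
  unfold Spec_feedback feedback feedback_alt
  simp only [flags_foldl, Bool.false_or]
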